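-- pv_equiv track=rewrite | github.com/carlomartinez8/el-capi-data | pipeline/assertions.py | assert_canonical_ids_unique
-- ===== SOURCE A (Python) =====
-- def assert_canonical_ids_unique(players: list[dict]) -> tuple[bool, str]:
--     """All canonical IDs must be unique and non-empty."""
--     ids = [p.get("canonical_id") for p in players]
--     empty = sum(1 for i in ids if not i)
--     if empty:
--         return False, f"{empty} players missing canonical_id"
--     dupes = len(ids) - len(set(ids))
--     if dupes:
--         return False, f"{dupes} duplicate canonical_ids found"
--     return True, f"All {len(ids)} canonical IDs are unique"
-- ===== SOURCE B (Python) =====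
-- def assert_canonical_ids_unique(players: list[dict]) -> tuple[bool, str]:
--     """All canonical IDs must be unique and non-empty (sort-then-scan)."""
--     ids = []
--     empty = 0
--     for p in players:
--         cid = p.get("canonical_id")
--         if cid:
--             ids.append(cid)
--         else:
--             empty += 1
--     if empty:
--         return False, f"{empty} players missing canonical_id"
--     ids.sort()
--     dupes = sum(1 for a, b in zip(ids, ids[1:]) if a == b)
--     if dupes:
--         return False, f"{dupes} duplicate canonical_ids found"
--     return True, f"All {len(players)} canonical IDs are unique"
-- ===== Notes on version B (the rewrite author's own statement) =====
-- stated objective: alternative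
-- what changed: Replaces A's hash-set distinct-count arithmetic (len(ids) - len(set(ids))) by a sort-then-scan: collect the truthy ids in one pass, sort them, and count duplicates as adjacent equal pairs in the sorted list; no set is built at all.
import Mathlib
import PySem

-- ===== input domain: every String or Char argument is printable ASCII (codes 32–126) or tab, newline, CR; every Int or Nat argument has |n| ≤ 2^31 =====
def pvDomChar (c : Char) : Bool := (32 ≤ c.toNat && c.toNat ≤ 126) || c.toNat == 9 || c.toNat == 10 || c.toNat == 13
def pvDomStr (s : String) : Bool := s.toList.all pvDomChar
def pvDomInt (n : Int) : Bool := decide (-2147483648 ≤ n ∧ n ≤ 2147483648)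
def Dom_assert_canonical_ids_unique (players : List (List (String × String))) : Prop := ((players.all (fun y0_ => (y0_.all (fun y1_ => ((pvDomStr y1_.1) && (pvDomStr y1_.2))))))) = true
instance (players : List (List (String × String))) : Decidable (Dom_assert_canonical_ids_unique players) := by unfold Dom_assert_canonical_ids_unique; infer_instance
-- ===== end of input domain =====

-- B replaces A's hash-set distinct-count arithmetic by sort-then-scan: collect truthy ids
-- in one pass, sort, count duplicates as adjacent equal pairs; same messages and priority.

-- ===== PORT A =====
def assert_canonical_ids_unique (players : List (List (String × String))) : Bool × String :=
  let ids := players.map (fun p => (PySem.Dict.mk p).get? "canonical_id")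
  let empty : Int := (ids.countP (fun i => i == none || i == some "") : Int)
  if empty ≠ 0 then
    (false, PySem.Int.toStr empty ++ " players missing canonical_id")
  else
    let dupes : Int := (ids.length : Int) - ((PySem.Set.ofList ids).length : Int)
    if dupes ≠ 0 then
      (false, PySem.Int.toStr dupes ++ " duplicate canonical_ids found")
    else
      (true, "All " ++ PySem.Int.toStr (ids.length : Int) ++ " canonical IDs are unique")

-- ===== PORT B =====
-- B's first loop: state = (ids collected so far, empty counter)
def pvStepB (st : List String × Int) (p : List (String × String)) : List String × Int :=
  let cid := (PySem.Dict.mk p).get? "canonical_id"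
  if cid == none || cid == some "" then (st.1, st.2 + 1)
  else (st.1 ++ [cid.getD ""], st.2)   -- cid is truthy here, so 'some' with a nonempty payload

def assert_canonical_ids_unique_alt (players : List (List (String × String))) : Bool × String :=
  let r := players.foldl pvStepB (([] : List String), (0 : Int))
  if r.2 ≠ 0 then
    (false, PySem.Int.toStr r.2 ++ " players missing canonical_id")
  else
    let ids := PySem.List.sorted r.1 (fun x => x) false
    -- zip(ids, ids[1:]): ids[1:] is PySem.List.slice ids (some 1) none
    let dupes : Int := ((ids.zip (PySem.List.slice ids (some 1) none)).countP (fun ab => ab.1 == ab.2) : Int)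
    if dupes ≠ 0 then
      (false, PySem.Int.toStr dupes ++ " duplicate canonical_ids found")
    else
      (true, "All " ++ PySem.Int.toStr (players.length : Int) ++ " canonical IDs are unique")

-- ===== PRECONDITION & SPEC =====
def Spec_assert_canonical_ids_unique (players : List (List (String × String))) (out : Bool × String) : Prop := out = assert_canonical_ids_unique_alt players
instance (players : List (List (String × String))) (out : Bool × String) : Decidable (Spec_assert_canonical_ids_unique players out) := by unfold Spec_assert_canonical_ids_unique; infer_instance

-- ===== CLAIM (what is proved, stated in full; the proofs are below) =====
def Claim_equal_assert_canonical_ids_unique : Prop := ∀ (players : List (List (String × String))), Dom_assert_canonical_ids_unique players → Spec_assert_canonical_ids_unique players (assert_canonical_ids_unique players)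

-- ===== LEMMAS AND PROOFS =====

-- the truthy ids of a player list, in order (closed form of B's first loop's list component)
def pvTids (l : List (List (String × String))) : List String :=
  ((l.map (fun p => (PySem.Dict.mk p).get? "canonical_id")).filter
    (fun i => !(i == none || i == some ""))).map (fun i => i.getD "")

-- closed form of B's first loop
theorem pvStepB_foldl (l : List (List (String × String))) (acc : List String) (e : Int) :
    l.foldl pvStepB (acc, e) =
      (acc ++ pvTids l,
       e + ((l.map (fun p => (PySem.Dict.mk p).get? "canonical_id")).countP
              (fun i => i == none || i == some "") : Int)) := by
  induction l generalizing acc e with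
  | nil => simp [pvTids]
  | cons p t ih =>
    rcases hcid : (PySem.Dict.mk p).get? "canonical_id" with _ | s
    · simp [List.foldl_cons, pvStepB, pvTids, hcid, ih]
      ring
    · by_cases hs : s = ""
      · subst hs
        simp [List.foldl_cons, pvStepB, pvTids, hcid, ih]
        ring
      · simp [List.foldl_cons, pvStepB, pvTids, hcid, hs, ih]

-- a PySem set's size is the number of distinct elements
theorem pvLenOfList {α : Type} [BEq α] [LawfulBEq α] [DecidableEq α] (ys : List α) :
    (PySem.Set.ofList ys).length = ys.toFinset.card := by
  have hnd : (PySem.Set.ofList ys).Nodup := PySem.Set.nodup_ofList ys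
  have hfs : (PySem.Set.ofList ys).toFinset = ys.toFinset := by
    ext a; simp [PySem.Set.mem_ofList]
  rw [← List.toFinset_card_of_nodup hnd, hfs]

-- adjacent-equal-pair count of a ≤-sorted list = length minus number of distinct elements
theorem pvAdjCount {α : Type} [BEq α] [LawfulBEq α] [DecidableEq α] [LinearOrder α]
    (zs : List α) (h : zs.Pairwise (· ≤ ·)) :
    (zs.zip zs.tail).countP (fun ab => ab.1 == ab.2) + zs.toFinset.card = zs.length := by
  induction zs with
  | nil => simp
  | cons a t ih =>
    cases t with
    | nil => simp
    | cons b u =>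
      have hpt : (b :: u).Pairwise (· ≤ ·) := (List.pairwise_cons.mp h).2
      have hab : a ≤ b := (List.pairwise_cons.mp h).1 b (by simp)
      have ihp := ih hpt
      simp only [List.tail_cons, List.zip_cons_cons, List.countP_cons, List.toFinset_cons,
        List.length_cons] at ihp ⊢
      by_cases hae : a = b
      · subst hae
        rw [Finset.insert_idem]
        simp only [beq_self_eq_true, if_true]
        omega
      · have hnm : a ∉ b :: u := by
          intro hm
          rcases List.mem_cons.mp hm with h1 | h2
          · exact hae h1
          · exact hae (le_antisymm hab ((List.pairwise_cons.mp hpt).1 a h2))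
        have hni : a ∉ insert b u.toFinset := by
          simpa [List.toFinset_cons] using hnm
        rw [Finset.card_insert_of_notMem hni]
        have hbf : (a == b) = false := by simp [hae]
        rw [hbf]
        simp only [Bool.false_eq_true, if_false]
        omega

-- ===== VERDICT (by name: the statement is the Claim_ definition above) =====
theorem assert_canonical_ids_unique_spec : Claim_equal_assert_canonical_ids_unique := by
  intro players _
  unfold Spec_assert_canonical_ids_unique assert_canonical_ids_unique assert_canonical_ids_unique_alt
  rw [pvStepB_foldl]
  simp only [List.nil_append, zero_add]
  set ids := players.map (fun p => (PySem.Dict.mk p).get? "canonical_id") with hids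
  by_cases he : ((ids.countP (fun i => i == none || i == some "")) : Int) ≠ 0
  · rw [if_pos he, if_pos he]
  · rw [if_neg he, if_neg he]
    push Not at he
    have he' : ids.countP (fun i => i == none || i == some "") = 0 := by exact_mod_cast he
    -- no falsy id: every id is some of a nonempty string, and pvTids is the payload list
    have hfilt : ids.filter (fun i => !(i == none || i == some "")) = ids := by
      rw [List.filter_eq_self]
      intro a ha
      have h2 := (List.countP_eq_zero.mp he') a ha
      revert h2; cases a <;> simp
    have htids : pvTids players = ids.map (fun i => i.getD "") := by
      rw [pvTids, ← hids, hfilt]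
    have hmapsome : (pvTids players).map (fun s => (some s : Option String)) = ids := by
      rw [htids, List.map_map]
      have : ∀ i ∈ ids, (some (i.getD "") : Option String) = i := by
        intro i hi
        have h2 := (List.countP_eq_zero.mp he') i hi
        cases i with
        | none => simp at h2
        | some s => rfl
      calc ids.map ((fun s => (some s : Option String)) ∘ fun i => i.getD "")
          = ids.map id := List.map_congr_left this
        _ = ids := List.map_id ids
    -- lengths and distinct counts
    have hlen : (pvTids players).length = ids.length := by
      rw [← hmapsome, List.length_map]
    have hplen : ids.length = players.length := by rw [hids, List.length_map]
    have hcard : (PySem.Set.ofList ids).length = (pvTids players).toFinset.card := by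
      rw [pvLenOfList, ← hmapsome]
      have himg : ((pvTids players).map (fun s => (some s : Option String))).toFinset
          = (pvTids players).toFinset.image some := by
        ext a; simp
      rw [himg, Finset.card_image_of_injective _ (Option.some_injective String)]
    set zs := PySem.List.sorted (pvTids players) (fun x => x) false with hzs
    have hsortp : zs.Pairwise (· ≤ ·) := by
      simpa using PySem.List.sorted_pairwise (pvTids players) (fun x => x)
    have hperm : zs.Perm (pvTids players) := PySem.List.sorted_perm _ _ _
    have hfs : zs.toFinset = (pvTids players).toFinset := List.toFinset_eq_of_perm _ _ hperm
    have hzl : zs.length = (pvTids players).length := hperm.length_eq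
    have hadj := pvAdjCount zs hsortp
    rw [hfs, hzl] at hadj
    have htl : PySem.List.slice zs (some 1) none = zs.tail := PySem.List.slice_from_one zs
    rw [htl]
    have hd : (ids.length : Int) - ((PySem.Set.ofList ids).length : Int)
        = (((zs.zip zs.tail).countP (fun ab => ab.1 == ab.2)) : Int) := by
      have hle : (pvTids players).toFinset.card ≤ (pvTids players).length :=
        List.toFinset_card_le _
      omega
    rw [hd, hplen]
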